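-- pv_equiv track=rewrite | github.com/ASkiingrock/Tkinter-StopwatchCalculator | stopwatchfuncs.py | printMultipleLaps
-- ===== SOURCE A (Python) =====
-- def printLapPlain(list):
--     times = ""
--
--     # Time:         Difference:
--     # 00:00:00.000  00:00:00.000
--
--     times += list[0]
--     times += ' '*(14-len(list[0]))
--
--     times += list[1]
--     times += ' '*(12-len(list[1]))
--     return times
--
-- def printMultipleLaps(list):
--     if list == []:
--         return ''
--     dictLaps = {}
--     output = ''
--     for i,j in enumerate(list):
--         dictLaps[str(i)] = printLapPlain(j)
--
--     for item in dictLaps.keys():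
--         if item == "0":
--             pass
--         else:
--             if int(item) < 1000:
--                 output += '\n' + item + ' '*(4-len(item)) + dictLaps[item]
--             elif int(item) > 999:
--                 output += '\n999 ' + dictLaps[item]
--
--     return output[1:]
-- ===== SOURCE B (Python) =====
-- def padTo(s, w):
--     return s + ' ' * (w - len(s))
--
-- def printLapPlain(list):
--     return padTo(list[0], 14) + padTo(list[1], 12)
--
-- def printMultipleLaps(list):
--     lines = []
--     for i, j in enumerate(list):
--         plain = printLapPlain(j)   # evaluated for every lap, like the original
--         if i == 0:
--             continue
--         prefix = padTo(str(i), 4) if i < 1000 else '999 '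
--         lines.append(prefix + plain)
--     return '\n'.join(lines)
-- ===== Notes on version B (the rewrite author's own statement) =====
-- stated objective: simpler
-- what changed: Replaces A's two-pass build-a-str-keyed-dict then re-iterate-its-keys-with-int(key)-parsing and '\n'-prefixed string concatenation sliced by [1:] with a single enumerate pass that appends formatted lines to a list and returns '\n'.join(lines), using one padTo helper for all field padding.
import Mathlib
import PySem

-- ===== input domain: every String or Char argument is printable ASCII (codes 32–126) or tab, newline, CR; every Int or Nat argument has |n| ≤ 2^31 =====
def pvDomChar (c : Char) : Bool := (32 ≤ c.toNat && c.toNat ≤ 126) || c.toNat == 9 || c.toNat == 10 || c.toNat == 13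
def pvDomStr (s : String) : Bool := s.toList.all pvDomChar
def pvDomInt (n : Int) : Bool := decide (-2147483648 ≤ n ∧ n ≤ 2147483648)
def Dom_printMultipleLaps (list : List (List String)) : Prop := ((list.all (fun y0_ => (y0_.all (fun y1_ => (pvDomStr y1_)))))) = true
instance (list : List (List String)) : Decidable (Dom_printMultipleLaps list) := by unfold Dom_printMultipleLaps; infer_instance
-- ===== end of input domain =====

-- ===== PORT A =====
-- B changes the decomposition only: one enumerate pass building a list of lines joined by '\n',
-- instead of A's str-keyed dict rebuilt-then-reiterated with '\n'-prefixed concatenation sliced by [1:].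

-- ' ' * n  (empty for n ≤ 0, as in Python)
def pvSpaces (n : Int) : List Char := List.replicate n.toNat ' '

-- int(item) for this loop's dict keys: they are exactly str(i) for the indices i, i.e. canonical
-- non-negative decimal strings, and on those this hand parse is exact (= Python's int).
def pvParseInt (s : String) : Int := s.toList.foldl (fun a c => a * 10 + ((c.toNat : Int) - 48)) 0

-- printLapPlain: strings handled as char lists (PySem convention); list[0]/list[1] total via
-- pyGetD under Pre_ (Python raises IndexError on inner lists shorter than 2 — excluded by Pre_).
def printLapPlainA (l : List String) : List Char :=
  let t0 := (PySem.List.pyGetD l 0 "").toList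
  let t1 := (PySem.List.pyGetD l 1 "").toList
  (([] ++ t0) ++ pvSpaces (14 - (t0.length : Int))) ++ t1 ++ pvSpaces (12 - (t1.length : Int))

def printMultipleLaps (list : List (List String)) : String :=
  if list = [] then ""
  else
    let dictLaps : PySem.Dict String (List Char) :=
      (PySem.List.enumerate list).foldl
        (fun d p => d.insert (PySem.Int.toStr p.1) (printLapPlainA p.2)) PySem.Dict.empty
    let output : List Char :=
      dictLaps.keys.foldl
        (fun out item =>
          if item == "0" then out
          else if pvParseInt item < 1000 then
            out ++ '\n' :: (item.toList ++ pvSpaces (4 - (item.toList.length : Int)) ++ dictLaps.getD item [])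
          else if pvParseInt item > 999 then
            out ++ '\n' :: ("999 ".toList ++ dictLaps.getD item [])
          else out) ([] : List Char)
    String.ofList (PySem.List.slice output (some 1) none)

-- ===== PORT B =====
-- padTo s w = s + ' ' * (w - len(s))
def pvPadTo (cs : List Char) (w : Int) : List Char :=
  cs ++ List.replicate (w - (cs.length : Int)).toNat ' '

def printLapPlainB (l : List String) : List Char :=
  pvPadTo (PySem.List.pyGetD l 0 "").toList 14 ++ pvPadTo (PySem.List.pyGetD l 1 "").toList 12

def printMultipleLaps_alt (list : List (List String)) : String :=
  let lines : List (List Char) :=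
    (PySem.List.enumerate list).foldl
      (fun acc p =>
        let plain := printLapPlainB p.2
        if p.1 == 0 then acc
        else acc ++ [(if p.1 < 1000 then pvPadTo (PySem.Int.toChars p.1) 4 else "999 ".toList) ++ plain])
      ([] : List (List Char))
  String.ofList (PySem.Chars.join ['\n'] lines)

-- ===== PRECONDITION & SPEC =====
-- Pre_ excludes exactly the inputs where Python A raises IndexError: an inner lap list with
-- fewer than 2 entries (printLapPlain reads list[0] and list[1]).
def Pre_printMultipleLaps (list : List (List String)) : Prop := ∀ l ∈ list, 2 ≤ l.length
instance (list : List (List String)) : Decidable (Pre_printMultipleLaps list) := by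
  unfold Pre_printMultipleLaps; infer_instance
def pvWitness_printMultipleLaps : List (List String) :=
  [["00:00:00.000", "00:00:00.000"], ["00:01:02.003", "00:01:02.003"]]

def Spec_printMultipleLaps (list : List (List String)) (out : String) : Prop := out = printMultipleLaps_alt list
instance (list : List (List String)) (out : String) : Decidable (Spec_printMultipleLaps list out) := by unfold Spec_printMultipleLaps; infer_instance

-- ===== CLAIM (what is proved, stated in full; the proofs are below) =====
def Claim_equal_printMultipleLaps : Prop := ∀ (list : List (List String)), Dom_printMultipleLaps list → Pre_printMultipleLaps list → Spec_printMultipleLaps list (printMultipleLaps list)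

-- ===== LEMMAS AND PROOFS =====

-- str(i) round-trip for the hand parse used in PORT A (Nat.toDigits core of PySem.Int.toStr).
theorem pv_toDigitsCore_acc (f n : Nat) (ds : List Char) :
    Nat.toDigitsCore 10 f n ds = Nat.toDigitsCore 10 f n [] ++ ds := by
  induction f generalizing n ds with
  | zero => simp [Nat.toDigitsCore]
  | succ f ih =>
    simp only [Nat.toDigitsCore]
    by_cases h : n / 10 = 0
    · simp [h]
    · rw [if_neg h, if_neg h, ih (n/10) ((n % 10).digitChar :: ds), ih (n/10) [(n % 10).digitChar]]
      simp

theorem pv_digitChar_val (m : Nat) (h : m < 10) : ((m.digitChar.toNat : Int) - 48) = (m : Int) := by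
  interval_cases m <;> decide

theorem pv_parse_toDigits (f n : Nat) (h : n < f) :
    (Nat.toDigitsCore 10 f n []).foldl (fun a c => a * 10 + ((c.toNat : Int) - 48)) 0 = (n : Int) := by
  induction f generalizing n with
  | zero => omega
  | succ f ih =>
    simp only [Nat.toDigitsCore]
    by_cases h0 : n / 10 = 0
    · rw [if_pos h0]
      simp only [List.foldl]
      rw [pv_digitChar_val _ (Nat.mod_lt _ (by norm_num))]
      push_cast; omega
    · rw [if_neg h0, pv_toDigitsCore_acc, List.foldl_append, ih (n/10) (by omega)]
      simp only [List.foldl]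
      rw [pv_digitChar_val _ (Nat.mod_lt _ (by norm_num))]
      push_cast; omega

theorem pv_parse_toChars (a : Int) (ha : 0 ≤ a) : pvParseInt (PySem.Int.toStr a) = a := by
  unfold pvParseInt
  rw [PySem.Int.toList_toStr]
  unfold PySem.Int.toChars
  rw [if_neg (by omega), Nat.toDigits, pv_parse_toDigits _ _ (Nat.lt_succ_self _)]
  omega

theorem pv_toStr_inj {a b : Int} (ha : 0 ≤ a) (hb : 0 ≤ b)
    (h : PySem.Int.toStr a = PySem.Int.toStr b) : a = b := by
  have := congrArg pvParseInt h
  rwa [pv_parse_toChars a ha, pv_parse_toChars b hb] at this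

-- the two lap formatters agree
theorem pv_plain_eq (l : List String) : printLapPlainA l = printLapPlainB l := by
  simp [printLapPlainA, printLapPlainB, pvPadTo, pvSpaces, List.append_assoc]

-- the line both loops emit for index p.1 ≠ 0 (proof-only helper)
def pvLine (p : Int × List String) : List Char :=
  (if p.1 < 1000 then
     PySem.Int.toChars p.1 ++ pvSpaces (4 - ((PySem.Int.toChars p.1).length : Int))
   else "999 ".toList) ++ printLapPlainA p.2

-- A's '\n'-prefixed concatenation vs B's list of lines
theorem pv_bridge (line : Int × List String → List Char) (l : List (Int × List String))
    (acc : List (List Char)) :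
    l.foldl (fun out p => if p.1 = 0 then out else out ++ '\n' :: line p)
        ((acc.map (fun c => '\n' :: c)).flatten)
      = ((l.foldl (fun a p => if p.1 = 0 then a else a ++ [line p]) acc).map
          (fun c => '\n' :: c)).flatten := by
  induction l generalizing acc with
  | nil => rfl
  | cons p l ih =>
    simp only [List.foldl_cons]
    by_cases h : p.1 = 0
    · rw [if_pos h, if_pos h]; exact ih acc
    · rw [if_neg h, if_neg h]
      have hstep : (acc.map (fun c => '\n' :: c)).flatten ++ '\n' :: line p
          = ((acc ++ [line p]).map (fun c => '\n' :: c)).flatten := by simp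
      rw [hstep]; exact ih _

theorem pv_join (ls : List (List Char)) :
    ((ls.map (fun c => '\n' :: c)).flatten).drop 1 = PySem.Chars.join ['\n'] ls := by
  induction ls with
  | nil => rfl
  | cons l ls ih =>
    cases ls with
    | nil => simp [PySem.Chars.join_singleton]
    | cons l2 rest =>
      rw [PySem.Chars.join_cons_cons]
      simp only [List.map_cons, List.flatten_cons, List.cons_append, List.drop_succ_cons,
        List.drop_zero] at ih ⊢
      rw [← ih]
      simp

-- ===== VERDICT (by name: the statement is the Claim_ definition above) =====
theorem printMultipleLaps_spec : Claim_equal_printMultipleLaps := by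
  intro list _ _
  unfold Spec_printMultipleLaps
  by_cases hl : list = []
  · subst hl; rfl
  · unfold printMultipleLaps printMultipleLaps_alt
    rw [if_neg hl]
    simp only []
    set e := PySem.List.enumerate list 0 with he
    set dict : PySem.Dict String (List Char) :=
      e.foldl (fun d p => d.insert (PySem.Int.toStr p.1) (printLapPlainA p.2))
        PySem.Dict.empty with hdict
    have hfst : ∀ p ∈ e, 0 ≤ p.1 := by
      intro p hp
      obtain ⟨k, hk, rfl⟩ := (PySem.List.mem_enumerate_iff list 0 p).1 hp
      simp
    have hmapmap : e.map (fun p => PySem.Int.toStr p.1)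
        = (e.map (fun p => p.1)).map PySem.Int.toStr := by
      rw [List.map_map]; rfl
    have hnodupmap : (e.map (fun p => PySem.Int.toStr p.1)).Nodup := by
      rw [hmapmap, PySem.List.map_fst_enumerate]
      refine List.Nodup.map_on ?_ (PySem.List.nodup_pyRange_one 0 _)
      intro x hx y hy hxy
      exact pv_toStr_inj (PySem.List.mem_pyRange_one.1 hx).1 (PySem.List.mem_pyRange_one.1 hy).1 hxy
    have hitems : dict.items = e.map (fun p => (PySem.Int.toStr p.1, printLapPlainA p.2)) := by
      rw [hdict, PySem.Dict.items_foldl_insert_fresh e _ _ _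
        (fun a _ => PySem.Dict.contains_empty _) hnodupmap]
      rfl
    have hkeys : dict.keys = e.map (fun p => PySem.Int.toStr p.1) := by
      simp only [PySem.Dict.keys, hitems, List.map_map]
      rfl
    have hnodupkeys : dict.keys.Nodup := by rw [hkeys]; exact hnodupmap
    have hget : ∀ p ∈ e, dict.getD (PySem.Int.toStr p.1) [] = printLapPlainA p.2 := by
      intro p hp
      exact PySem.Dict.getD_of_mem_items dict
        (by rw [hitems]; exact List.mem_map_of_mem hp) hnodupkeys []
    rw [hkeys, List.foldl_map]
    rw [PySem.List.foldl_congr_mem e _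
      (fun out p => if p.1 = 0 then out else out ++ '\n' :: pvLine p) [] ?hbody]
    case hbody =>
      intro acc p hp
      obtain ⟨k, hk, rfl⟩ := (PySem.List.mem_enumerate_iff list 0 p).1 hp
      have hg := hget _ hp
      simp only [zero_add] at hg ⊢
      rw [hg, pv_parse_toChars _ (by positivity), PySem.Int.toList_toStr]
      by_cases hk0 : (k : Int) = 0
      · rw [if_pos hk0]
        have : PySem.Int.toStr (k : Int) = "0" := by
          rw [hk0]; rfl
        rw [this]
        rfl
      · have hne : ¬ (PySem.Int.toStr (k : Int) == "0") = true := by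
          intro hcontra
          exact hk0 (pv_toStr_inj (by positivity) (by norm_num)
            ((beq_iff_eq).1 hcontra))
        rw [if_neg hne, if_neg hk0]
        unfold pvLine
        by_cases hlt : (k : Int) < 1000
        · rw [if_pos hlt, if_pos hlt]
        · rw [if_neg hlt, if_neg hlt, if_pos (by omega : (999 : Int) < (k : Int))]
    -- B side: rewrite its body to the same shape
    rw [PySem.List.foldl_congr_mem e _
      (fun a p => if p.1 = 0 then a else a ++ [pvLine p]) [] ?haltbody]
    case haltbody =>
      intro acc p _
      simp only [beq_iff_eq]
      by_cases h : p.1 = 0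
      · rw [if_pos h, if_pos h]
      · rw [if_neg h, if_neg h]
        unfold pvLine
        rw [← pv_plain_eq]
        by_cases hlt : p.1 < 1000
        · rw [if_pos hlt, if_pos hlt]
          simp [pvPadTo, pvSpaces]
        · rw [if_neg hlt, if_neg hlt]
    have hbr := pv_bridge pvLine e []
    simp only [List.map_nil, List.flatten_nil] at hbr
    rw [hbr, PySem.List.slice_from _ (by norm_num : (0:Int) ≤ 1)]
    show String.ofList (List.drop (Int.toNat 1) _) = _
    rw [(by rfl : Int.toNat 1 = 1), pv_join]
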